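-- pv_equiv track=rewrite | github.com/beaupollard/VAE_RoboGAN | train_gnn_reward_net.py | keep_first_one
-- ===== SOURCE A (Python) =====
-- def keep_first_one(ms):
--     total = []
--     for matrix in ms:
--         for row in matrix:
--             found_one = False
--             for i in range(len(row)):
--                 if row[i] == 1:
--                     if found_one:
--                         row[i] = 0
--                     else:
--                         found_one = True
--         total.append(matrix)
--     return total
-- ===== SOURCE B (Python) =====
-- def keep_first_one(ms):
--     return [[[0 if x == 1 and 1 in row[:i] else x
--               for i, x in enumerate(row)]
--              for row in matrix]
--             for matrix in ms]
-- ===== Notes on version B (the rewrite author's own statement) =====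
-- stated objective: simpler
-- what changed: Replaces A's stateful in-place mutation loops (a found_one flag threaded through each row) by a pure nested comprehension where each element is decided by a closed positional predicate: a 1 becomes 0 exactly when another 1 occurs in the prefix before it (1 in row[:i]); no flag, no mutation. Return-value equivalence only: A mutates its argument rows in place, B builds fresh lists.
import Mathlib
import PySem

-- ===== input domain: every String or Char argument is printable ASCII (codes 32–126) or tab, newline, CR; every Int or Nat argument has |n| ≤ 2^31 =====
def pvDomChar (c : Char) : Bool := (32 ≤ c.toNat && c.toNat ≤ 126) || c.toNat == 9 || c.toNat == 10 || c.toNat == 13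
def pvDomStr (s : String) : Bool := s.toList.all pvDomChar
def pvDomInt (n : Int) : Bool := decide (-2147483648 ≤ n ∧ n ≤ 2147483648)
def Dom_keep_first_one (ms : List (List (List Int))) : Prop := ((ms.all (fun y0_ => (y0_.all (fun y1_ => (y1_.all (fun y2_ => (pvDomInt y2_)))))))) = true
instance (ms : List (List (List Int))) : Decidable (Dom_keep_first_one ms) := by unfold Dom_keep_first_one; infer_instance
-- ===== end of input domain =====

-- B replaces A's stateful in-place flag loop by a pure nested comprehension with a closed positional
-- predicate (a 1 is zeroed iff a 1 occurs in the prefix before it). Return-value equivalence only: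
-- Python A mutates its argument rows in place, B builds fresh lists.


-- ===== PORT A =====
-- A: one in-place pass per row with a found_one flag; later 1s become 0.
def pvRowA : Bool → List Int → List Int
  | _, [] => []
  | found, x :: xs =>
    if x = 1 then
      if found then 0 :: pvRowA found xs else x :: pvRowA true xs
    else x :: pvRowA found xs

def keep_first_one (ms : List (List (List Int))) : List (List (List Int)) :=
  ms.map (fun matrix => matrix.map (fun row => pvRowA false row))

-- ===== PORT B =====
-- B: pure comprehension; element at index i is zeroed iff it is 1 and 1 ∈ row[:i].
-- 'enumerate(row)' is List.zipIdx (value, index); 'row[:i]' for the nonnegative index i is row.take i (exact here).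
def pvRowB (row : List Int) : List Int :=
  row.zipIdx.map (fun p => if p.1 = 1 ∧ 1 ∈ row.take p.2 then 0 else p.1)

def keep_first_one_alt (ms : List (List (List Int))) : List (List (List Int)) :=
  ms.map (fun matrix => matrix.map pvRowB)

-- ===== PRECONDITION & SPEC =====
def Spec_keep_first_one (ms : List (List (List Int))) (out : List (List (List Int))) : Prop := out = keep_first_one_alt ms
instance (ms : List (List (List Int))) (out : List (List (List Int))) : Decidable (Spec_keep_first_one ms out) := by unfold Spec_keep_first_one; infer_instance

-- ===== CLAIM (what is proved, stated in full; the proofs are below) =====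
def Claim_equal_keep_first_one : Prop := ∀ (ms : List (List (List Int))), Dom_keep_first_one ms → Spec_keep_first_one ms (keep_first_one ms)

-- ===== LEMMAS AND PROOFS =====

lemma pvRow_key (xs : List Int) : ∀ (found : Bool) (k : Nat) (row : List Int),
    xs = row.drop k → found = decide (1 ∈ row.take k) →
    pvRowA found xs
      = (xs.zipIdx k).map (fun p => if p.1 = 1 ∧ 1 ∈ row.take p.2 then 0 else p.1) := by
  induction xs with
  | nil => intro found k row _ _; rfl
  | cons x xs ih =>
    intro found k row hdrop hfound
    have hget : row[k]? = some x := by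
      rw [← List.head?_drop, ← hdrop]; rfl
    have htake : row.take (k + 1) = row.take k ++ [x] := by
      rw [List.take_add_one, hget]; rfl
    have hdrop' : xs = row.drop (k + 1) := by
      have h : row.drop (k + 1) = (row.drop k).tail := by
        rw [← List.drop_drop]; simp
      rw [h, ← hdrop]; rfl
    simp only [List.zipIdx_cons, List.map_cons]
    by_cases hx : x = 1
    · subst hx
      have hnext : (true : Bool) = decide (1 ∈ row.take (k + 1)) := by
        simp [htake]
      by_cases hf : found = true
      · subst hf
        have hmem : 1 ∈ row.take k := of_decide_eq_true hfound.symm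
        have hA : pvRowA true (1 :: xs) = 0 :: pvRowA true xs := rfl
        rw [hA, ih true (k + 1) row hdrop' hnext]
        congr 1
        rw [if_pos ⟨rfl, hmem⟩]
      · have hfalse : found = false := Bool.eq_false_iff.mpr hf
        subst hfalse
        have hmem : ¬ (1 ∈ row.take k) := of_decide_eq_false hfound.symm
        have hA : pvRowA false (1 :: xs) = 1 :: pvRowA true xs := rfl
        rw [hA, ih true (k + 1) row hdrop' hnext]
        congr 1
        rw [if_neg (fun h => hmem h.2)]
    · have hnext : found = decide (1 ∈ row.take (k + 1)) := by
        rw [hfound, htake]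
        congr 1
        rw [eq_iff_iff, List.mem_append]
        constructor
        · exact Or.inl
        · rintro (h | h)
          · exact h
          · have h1 : (1 : Int) = x := by simpa using h
            exact absurd h1.symm hx
      have hA : pvRowA found (x :: xs) = x :: pvRowA found xs := by
        cases found <;> simp [pvRowA, hx]
      rw [hA, ih found (k + 1) row hdrop' hnext]
      congr 1
      rw [if_neg (fun h => hx h.1)]

lemma pvRow_eq (row : List Int) : pvRowA false row = pvRowB row := by
  unfold pvRowB
  exact pvRow_key row false 0 row (by simp) (by simp)

-- ===== VERDICT (by name: the statement is the Claim_ definition above) =====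
theorem keep_first_one_spec : Claim_equal_keep_first_one := by
  intro ms _
  unfold Spec_keep_first_one keep_first_one keep_first_one_alt
  simp [pvRow_eq]
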